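-- pv_equiv track=rewrite | github.com/Dixith-ai/Learning-Python | staging/_staging/advanced/count_paths_maze.py | count_paths_maze_with_paths
-- ===== SOURCE A (Python) =====
-- def count_paths_maze_with_paths(maze, start, end):
--     m, n = len(maze), len(maze[0])
--     dp = [[0] * n for _ in range(m)]
--
--     dp[start[0]][start[1]] = 1
--
--     for i in range(start[0], m):
--         for j in range(start[1], n):
--             if maze[i][j] == 1:
--                 dp[i][j] = 0
--             else:
--                 if i > start[0]:
--                     dp[i][j] += dp[i - 1][j]
--                 if j > start[1]:
--                     dp[i][j] += dp[i][j - 1]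
--
--     def get_paths(row, col, path):
--         if row == start[0] and col == start[1]:
--             return [path]
--
--         paths = []
--         if row > start[0] and dp[row - 1][col] > 0:
--             paths.extend(get_paths(row - 1, col, path + [(row, col)]))
--         if col > start[1] and dp[row][col - 1] > 0:
--             paths.extend(get_paths(row, col - 1, path + [(row, col)]))
--
--         return paths
--
--     return dp[end[0]][end[1]], get_paths(end[0], end[1], [])
-- ===== SOURCE B (Python) =====
-- def count_paths_maze_with_paths(maze, start, end):
--     # same DP count table as A (the count is dp[end], which must stay even when it
--     # differs from len(paths)); the path enumeration is an explicit-stack DFS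
--     # instead of A's recursion.
--     m, n = len(maze), len(maze[0])
--     dp = [[0] * n for _ in range(m)]
--
--     dp[start[0]][start[1]] = 1
--
--     for i in range(start[0], m):
--         for j in range(start[1], n):
--             if maze[i][j] == 1:
--                 dp[i][j] = 0
--             else:
--                 if i > start[0]:
--                     dp[i][j] += dp[i - 1][j]
--                 if j > start[1]:
--                     dp[i][j] += dp[i][j - 1]
--
--     results = []
--     stack = [(end[0], end[1], [])]
--     while stack:
--         r, c, path = stack.pop()
--         if r == start[0] and c == start[1]:
--             results.append(path)
--             continue
--         newpath = path + [(r, c)]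
--         if c > start[1] and dp[r][c - 1] > 0:
--             stack.append((r, c - 1, newpath))
--         if r > start[0] and dp[r - 1][c] > 0:
--             stack.append((r - 1, c, newpath))
--
--     return dp[end[0]][end[1]], results
-- ===== Notes on version B (the rewrite author's own statement) =====
-- stated objective: alternative
-- what changed: A's recursive get_paths enumeration is replaced by an iterative DFS over an explicit stack (popping a cell and pushing its left branch then its up branch, guarded by the same dp>0 tests); the DP count table and the returned dp[end] count are kept as in A.
import Mathlib
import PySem

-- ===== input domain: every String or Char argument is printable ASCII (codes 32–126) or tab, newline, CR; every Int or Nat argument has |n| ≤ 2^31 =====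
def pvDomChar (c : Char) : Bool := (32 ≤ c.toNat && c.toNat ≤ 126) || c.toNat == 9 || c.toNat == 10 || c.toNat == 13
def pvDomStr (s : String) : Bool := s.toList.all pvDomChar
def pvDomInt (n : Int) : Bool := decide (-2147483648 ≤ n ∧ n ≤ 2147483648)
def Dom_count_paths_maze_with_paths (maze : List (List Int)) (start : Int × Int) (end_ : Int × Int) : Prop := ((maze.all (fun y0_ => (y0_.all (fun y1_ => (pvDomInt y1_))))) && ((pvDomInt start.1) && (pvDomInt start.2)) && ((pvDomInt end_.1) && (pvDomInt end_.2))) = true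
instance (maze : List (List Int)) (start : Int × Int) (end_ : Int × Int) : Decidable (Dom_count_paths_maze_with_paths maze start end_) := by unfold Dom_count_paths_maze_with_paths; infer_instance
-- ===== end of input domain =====

-- B replaces A's recursive path enumeration by an explicit-stack iterative DFS over the
-- same DP count table (objective: alternative decomposition, same cost).

-- ===== PORT A =====
-- dp[i][j] read / write with Python index semantics (negative in-range indices wrap,
-- exact via pyGetD/pySetD; every index reached under Pre_ is in range).
def pvGet2 (dp : List (List Int)) (i j : Int) : Int :=
  PySem.List.pyGetD (PySem.List.pyGetD dp i []) j 0

def pvSet2 (dp : List (List Int)) (i j : Int) (v : Int) : List (List Int) :=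
  PySem.List.pySetD dp i (PySem.List.pySetD (PySem.List.pyGetD dp i []) j v)

-- the DP table of A (B's Python keeps this code verbatim, so both ports share it)
def pvBuildDp (maze : List (List Int)) (s0 s1 m n : Int) : List (List Int) :=
  let dp0 := List.replicate m.toNat (List.replicate n.toNat (0 : Int))
  let dp1 := pvSet2 dp0 s0 s1 1
  (PySem.List.pyRange s0 m 1).foldl (fun dp i =>
    (PySem.List.pyRange s1 n 1).foldl (fun dp j =>
      if pvGet2 maze i j = 1 then pvSet2 dp i j 0
      else
        let dp2 := if i > s0 then pvSet2 dp i j (pvGet2 dp i j + pvGet2 dp (i-1) j) else dp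
        if j > s1 then pvSet2 dp2 i j (pvGet2 dp2 i j + pvGet2 dp2 i (j-1)) else dp2) dp) dp1

-- distance of (r, c) to the start cell: each recursive step of A's get_paths (and each
-- pushed stack entry of B's loop) strictly decreases it, so it bounds the fuel below
def pvMeas (s0 s1 r c : Int) : Nat := (r - s0).toNat + (c - s1).toNat

-- A's recursive get_paths; the fuel argument is only a structural totality guard
-- (callers pass fuel > pvMeas, so the 0 branch is never reached)
def pvGetPaths (dp : List (List Int)) (s0 s1 : Int) : Nat → Int → Int → List (Int × Int) → List (List (Int × Int))
  | 0, _, _, _ => []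
  | fuel+1, row, col, path =>
    if row = s0 ∧ col = s1 then [path]
    else
      (if row > s0 ∧ pvGet2 dp (row-1) col > 0 then pvGetPaths dp s0 s1 fuel (row-1) col (path ++ [(row, col)]) else [])
      ++ (if col > s1 ∧ pvGet2 dp row (col-1) > 0 then pvGetPaths dp s0 s1 fuel row (col-1) (path ++ [(row, col)]) else [])

def count_paths_maze_with_paths (maze : List (List Int)) (start : Int × Int) (end_ : Int × Int) : Int × (List (List (Int × Int))) :=
  let m : Int := maze.length
  let n : Int := (PySem.List.pyGetD maze 0 []).length  -- len(maze[0]); exact: Pre_ gives maze ≠ []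
  let dp := pvBuildDp maze start.1 start.2 m n
  (pvGet2 dp end_.1 end_.2,
   pvGetPaths dp start.1 start.2 (pvMeas start.1 start.2 end_.1 end_.2 + 1) end_.1 end_.2 [])

-- ===== PORT B =====
-- B's while loop over an explicit stack; Python pops from the END of the list, so the
-- head of this list is the stack TOP: Python's 'append left branch, then append up
-- branch' is 'cons left, then cons up' here (up is popped first, exactly as in Python).
-- The fuel argument is only a structural totality guard: callers pass fuel exceeding
-- the loop's iteration count, so the 0 branch is never reached.
def pvLoopB (dp : List (List Int)) (s0 s1 : Int) : Nat → List (Int × Int × List (Int × Int)) → List (List (Int × Int)) → List (List (Int × Int))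
  | 0, _, results => results
  | fuel+1, stack, results =>
    match stack with
    | [] => results
    | (r, c, path) :: st =>
      if r = s0 ∧ c = s1 then pvLoopB dp s0 s1 fuel st (results ++ [path])
      else
        let newpath := path ++ [(r, c)]
        let st1 := if c > s1 ∧ pvGet2 dp r (c-1) > 0 then (r, c-1, newpath) :: st else st
        let st2 := if r > s0 ∧ pvGet2 dp (r-1) c > 0 then (r-1, c, newpath) :: st1 else st1
        pvLoopB dp s0 s1 fuel st2 results

def count_paths_maze_with_paths_alt (maze : List (List Int)) (start : Int × Int) (end_ : Int × Int) : Int × (List (List (Int × Int))) :=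
  let m : Int := maze.length
  let n : Int := (PySem.List.pyGetD maze 0 []).length
  let dp := pvBuildDp maze start.1 start.2 m n
  (pvGet2 dp end_.1 end_.2,
   pvLoopB dp start.1 start.2 (3 ^ pvMeas start.1 start.2 end_.1 end_.2 + 1) [(end_.1, end_.2, [])] [])

-- ===== PRECONDITION & SPEC =====
-- Pre_ is exactly where the Python A returns: nonempty maze, every row scanned by the DP
-- loop at least as wide as row 0, and start/end indices in Python's valid (possibly
-- negative, wrapping) range; outside it A raises IndexError.
def Pre_count_paths_maze_with_paths (maze : List (List Int)) (start : Int × Int) (end_ : Int × Int) : Prop :=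
  let m : Int := maze.length
  let n : Int := (maze.headD []).length
  maze ≠ [] ∧ (∀ row ∈ maze.drop (max start.1 0).toNat, n ≤ (row.length : Int)) ∧
  -m ≤ start.1 ∧ start.1 < m ∧ -n ≤ start.2 ∧ start.2 < n ∧
  -m ≤ end_.1 ∧ end_.1 < m ∧ -n ≤ end_.2 ∧ end_.2 < n
instance (maze : List (List Int)) (start : Int × Int) (end_ : Int × Int) : Decidable (Pre_count_paths_maze_with_paths maze start end_) := by unfold Pre_count_paths_maze_with_paths; infer_instance

def pvWitness_count_paths_maze_with_paths : List (List Int) × (Int × Int) × (Int × Int) := ([[0, 0], [0, 0]], (0, 0), (1, 1))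

def Spec_count_paths_maze_with_paths (maze : List (List Int)) (start : Int × Int) (end_ : Int × Int) (out : Int × (List (List (Int × Int)))) : Prop := out = count_paths_maze_with_paths_alt maze start end_
instance (maze : List (List Int)) (start : Int × Int) (end_ : Int × Int) (out : Int × (List (List (Int × Int)))) : Decidable (Spec_count_paths_maze_with_paths maze start end_ out) := by unfold Spec_count_paths_maze_with_paths; infer_instance

-- ===== CLAIM (what is proved, stated in full; the proofs are below) =====
def Claim_equal_count_paths_maze_with_paths : Prop := ∀ (maze : List (List Int)) (start : Int × Int) (end_ : Int × Int), Dom_count_paths_maze_with_paths maze start end_ → Pre_count_paths_maze_with_paths maze start end_ → Spec_count_paths_maze_with_paths maze start end_ (count_paths_maze_with_paths maze start end_)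

-- ===== LEMMAS AND PROOFS =====
theorem pv3pow (j : Nat) : 3 ^ j + 3 ^ j < 3 ^ (j + 1) := by
  have h : 0 < 3 ^ j := by positivity
  rw [pow_succ]; omega

-- any fuel above pvMeas gives A's recursion the same value
theorem pvGetPaths_fuel (dp : List (List Int)) (s0 s1 : Int) :
    ∀ (f1 f2 : Nat) (row col : Int) (path : List (Int × Int)),
      pvMeas s0 s1 row col < f1 → pvMeas s0 s1 row col < f2 →
      pvGetPaths dp s0 s1 f1 row col path = pvGetPaths dp s0 s1 f2 row col path := by
  intro f1
  induction f1 with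
  | zero => intro f2 row col path h1 h2; omega
  | succ f1 ih =>
    intro f2 row col path h1 h2
    match f2 with
    | 0 => omega
    | f2 + 1 =>
      by_cases hs : row = s0 ∧ col = s1
      · simp [pvGetPaths, hs]
      · simp only [pvGetPaths, if_neg hs]
        congr 1
        · split_ifs with h
          · have hr := h.1
            exact ih f2 (row-1) col _ (by simp only [pvMeas] at h1 ⊢; omega)
              (by simp only [pvMeas] at h2 ⊢; omega)
          · rfl
        · split_ifs with h
          · have hc := h.1
            exact ih f2 row (col-1) _ (by simp only [pvMeas] at h1 ⊢; omega)
              (by simp only [pvMeas] at h2 ⊢; omega)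
          · rfl

theorem pvGetPaths_start (dp : List (List Int)) (s0 s1 : Int) (f : Nat) (row col : Int)
    (path : List (Int × Int)) (hs : row = s0 ∧ col = s1) :
    pvGetPaths dp s0 s1 (f + 1) row col path = [path] := by
  simp [pvGetPaths, hs]

theorem pvGetPaths_step (dp : List (List Int)) (s0 s1 : Int) (f : Nat) (row col : Int)
    (path : List (Int × Int)) (hs : ¬(row = s0 ∧ col = s1)) :
    pvGetPaths dp s0 s1 (f + 1) row col path =
      (if row > s0 ∧ pvGet2 dp (row-1) col > 0 then pvGetPaths dp s0 s1 f (row-1) col (path ++ [(row, col)]) else [])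
      ++ (if col > s1 ∧ pvGet2 dp row (col-1) > 0 then pvGetPaths dp s0 s1 f row (col-1) (path ++ [(row, col)]) else []) := by
  simp [pvGetPaths, hs]

-- measure of a whole stack: Σ 3^pvMeas; it strictly decreases at every loop iteration
def pvSM (s0 s1 : Int) (st : List (Int × Int × List (Int × Int))) : Nat :=
  (st.map (fun e => 3 ^ pvMeas s0 s1 e.1 e.2.1)).sum

-- with enough fuel, B's stack loop appends, in order, A's enumeration of every stack entry
theorem pvLoopB_eq (dp : List (List Int)) (s0 s1 : Int) :
    ∀ (fuel : Nat) (st : List (Int × Int × List (Int × Int))) (res : List (List (Int × Int))),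
      pvSM s0 s1 st < fuel →
      pvLoopB dp s0 s1 fuel st res
        = res ++ (st.map (fun e => pvGetPaths dp s0 s1 (pvMeas s0 s1 e.1 e.2.1 + 1) e.1 e.2.1 e.2.2)).flatten := by
  intro fuel
  induction fuel with
  | zero => intro st res h; omega
  | succ fuel ih =>
    intro st res h
    match st with
    | [] => simp [pvLoopB]
    | (r, c, path) :: st =>
      have hpos : 0 < 3 ^ pvMeas s0 s1 r c := by positivity
      have hsm : pvSM s0 s1 ((r, c, path) :: st) = 3 ^ pvMeas s0 s1 r c + pvSM s0 s1 st := by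
        simp [pvSM]
      by_cases hs : r = s0 ∧ c = s1
      · simp only [pvLoopB, if_pos hs]
        rw [ih st (res ++ [path]) (by rw [hsm] at h; omega)]
        simp only [List.map_cons, List.flatten_cons, pvGetPaths_start dp s0 s1 _ r c path hs]
        simp
      · simp only [pvLoopB, if_neg hs]
        simp only [List.map_cons, List.flatten_cons, pvGetPaths_step dp s0 s1 _ r c path hs]
        split_ifs with hu hl hl'
        · have hr := hu.1
          have hc := hl.1
          have e1 : pvMeas s0 s1 (r-1) c + 1 = pvMeas s0 s1 r c := by
            simp only [pvMeas]; omega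
          have e2 : pvMeas s0 s1 r (c-1) + 1 = pvMeas s0 s1 r c := by
            simp only [pvMeas]; omega
          have h3 := pv3pow (pvMeas s0 s1 (r-1) c)
          rw [e1] at h3
          rw [ih ((r-1, c, path ++ [(r, c)]) :: (r, c-1, path ++ [(r, c)]) :: st) res
              (by rw [hsm] at h; simp only [pvSM, List.map_cons, List.sum_cons] at *
                  rw [show pvMeas s0 s1 r (c-1) = pvMeas s0 s1 (r-1) c by omega]
                  omega)]
          simp only [List.map_cons, List.flatten_cons]
          rw [pvGetPaths_fuel dp s0 s1 (pvMeas s0 s1 (r-1) c + 1) (pvMeas s0 s1 r c) (r-1) c _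
                (by omega) (by omega),
              pvGetPaths_fuel dp s0 s1 (pvMeas s0 s1 r (c-1) + 1) (pvMeas s0 s1 r c) r (c-1) _
                (by omega) (by omega)]
          simp
        · have hr := hu.1
          have e1 : pvMeas s0 s1 (r-1) c + 1 = pvMeas s0 s1 r c := by
            simp only [pvMeas]; omega
          have h3 := pv3pow (pvMeas s0 s1 (r-1) c)
          rw [e1] at h3
          rw [ih ((r-1, c, path ++ [(r, c)]) :: st) res
              (by rw [hsm] at h; simp only [pvSM, List.map_cons, List.sum_cons] at *; omega)]
          simp only [List.map_cons, List.flatten_cons]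
          rw [pvGetPaths_fuel dp s0 s1 (pvMeas s0 s1 (r-1) c + 1) (pvMeas s0 s1 r c) (r-1) c _
                (by omega) (by omega)]
          simp
        · have hc := hl'.1
          have e2 : pvMeas s0 s1 r (c-1) + 1 = pvMeas s0 s1 r c := by
            simp only [pvMeas]; omega
          have h3 := pv3pow (pvMeas s0 s1 r (c-1))
          rw [e2] at h3
          rw [ih ((r, c-1, path ++ [(r, c)]) :: st) res
              (by rw [hsm] at h; simp only [pvSM, List.map_cons, List.sum_cons] at *; omega)]
          simp only [List.map_cons, List.flatten_cons]
          rw [pvGetPaths_fuel dp s0 s1 (pvMeas s0 s1 r (c-1) + 1) (pvMeas s0 s1 r c) r (c-1) _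
                (by omega) (by omega)]
          simp
        · rw [ih st res (by rw [hsm] at h; omega)]
          simp

-- ===== VERDICT (by name: the statement is the Claim_ definition above) =====
theorem count_paths_maze_with_paths_spec : Claim_equal_count_paths_maze_with_paths := by
  intro maze start end_ _hd _hp
  unfold Spec_count_paths_maze_with_paths
  simp only [count_paths_maze_with_paths, count_paths_maze_with_paths_alt]
  rw [pvLoopB_eq _ start.1 start.2 _ _ _ (by simp [pvSM])]
  simp
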